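-- pv_equiv track=rewrite | github.com/pradyj77/dailyLeetcode | ProblemSet/January/Jan21/MapOfHighestPeak.py | highestPeak
-- ===== SOURCE A (Python) =====
-- from collections import deque
-- from typing import List
--
-- def highestPeak(isWater: List[List[int]]) -> List[List[int]]:
--     '''
--     [
--         [0,0,0,0,0,0,1,0],
--         [0,1,0,0,0,0,0,0],
--         [0,0,0,0,0,0,0,0],
--         [0,0,0,0,0,0,0,0],
--         [0,0,0,0,0,0,0,0],
--         [0,0,0,0,0,0,0,0],
--         [0,0,0,0,0,0,1,0],
--         [0,0,1,0,0,0,0,0]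
--     ]
--
--     [
--         [2,1,2,3,2,1,0,1],
--         [1,0,1,2,3,2,1,2],
--         [0,1,0,0,0,0,0,0],
--         [0,0,0,0,0,0,0,0],
--         [0,0,0,0,0,0,0,0],
--         [0,0,0,0,0,0,1,0],
--         [0,0,1,0,0,1,0,1],
--         [0,1,0,1,0,0,1,0]
--     ]
--
--     '''
--     # height = []
--     # for i in range(0, len(isWater)):
--     #     height.append([-1] * len(isWater[0]))
--
--     # for i in range(0, len(isWater)):
--     #     for j in range(0, len(isWater[0])):
--     #         if isWater[i][j] == 1:
--     #             height[i][j] = 0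
--
--     # for i in range(0, len(height)):
--     #     for j in range(0, len(height[i])):
--     #         if height[i][j] == -1:
--     #             rows = [-1, 1, 0, 0]
--     #             cols = [0, 0, -1, 1]
--     #             for k in range(0, 4):
--     #                 newRow = i + rows[k]
--     #                 newCol = j + cols[k]
--     #                 if newRow >= 0 and newRow < len(height) and newCol >= 0 and newCol < len(height[0]):
--     #                     if isWater[newRow][newCol] == 1: # This is water cell
--     #                         height[i][j] = 1
--
--
--     # for i in range(0, len(height)):
--     #     for j in range(0, len(height[0])):
--     #         if height[i][j] == -1:
--     #             height[i][j] = max(height[i][j], height[newRow][newCol] + 1)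
--
--
--     # return height
--
--     m, n = len(isWater), len(isWater[0])
--     height = [[-1] * n for _ in range(m)]  # Initialize heights to -1 to indicate unvisited cells
--     queue = deque()
--
--     # Initialize BFS with all water cells at height 0
--     for i in range(m):
--         for j in range(n):
--             if isWater[i][j] == 1:
--                 height[i][j] = 0
--                 queue.append((i, j))
--
--     directions = [(0, 1), (1, 0), (0, -1), (-1, 0)]  # Right, Down, Left, Up
--
--     # BFS to assign heights to land cells
--     while queue:
--         x, y = queue.popleft()
--         current_height = height[x][y]
--         for dx, dy in directions:
--             nx, ny = x + dx, y + dy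
--             if 0 <= nx < m and 0 <= ny < n and height[nx][ny] == -1:
--                 height[nx][ny] = current_height + 1
--                 queue.append((nx, ny))
--
--     return height
-- ===== SOURCE B (Python) =====
-- from typing import List
--
-- def highestPeak(isWater: List[List[int]]) -> List[List[int]]:
--     m, n = len(isWater), len(isWater[0])
--     waters = [(i, j) for i in range(m) for j in range(n) if isWater[i][j] == 1]
--     if not waters:
--         return [[-1] * n for _ in range(m)]
--     return [[min(abs(i - a) + abs(j - b) for a, b in waters)
--              for j in range(n)] for i in range(m)]
-- ===== Notes on version B (the rewrite author's own statement) =====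
-- stated objective: alternative
-- what changed: Replaces the multi-source BFS (deque + height-grid mutation) by a direct closed-form computation: collect the water cells once, then each cell's height is the minimum Manhattan distance to any water cell (all -1 when there is no water), which is exactly what the BFS computes on an obstacle-free grid.
import Mathlib
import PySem

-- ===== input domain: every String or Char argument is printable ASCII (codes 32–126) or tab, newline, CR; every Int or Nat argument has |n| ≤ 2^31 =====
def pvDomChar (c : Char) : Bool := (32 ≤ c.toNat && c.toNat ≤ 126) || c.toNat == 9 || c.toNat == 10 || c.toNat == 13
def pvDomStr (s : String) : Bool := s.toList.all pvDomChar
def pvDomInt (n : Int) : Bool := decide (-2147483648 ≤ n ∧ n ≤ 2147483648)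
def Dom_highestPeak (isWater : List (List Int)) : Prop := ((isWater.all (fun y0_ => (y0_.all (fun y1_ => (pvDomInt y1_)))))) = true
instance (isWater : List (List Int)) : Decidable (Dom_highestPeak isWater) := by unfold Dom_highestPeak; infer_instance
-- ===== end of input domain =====

-- B replaces A's multi-source BFS by a direct closed-form computation: each cell's height is the
-- minimum Manhattan distance to any water cell (−1 everywhere when there is no water); an
-- alternative algorithm of similar overall cost, proved to return exactly A's value.

-- ===== PORT A =====
-- height[i][j] read/write (indices are in range wherever the ports use them under Pre_)
def pvHget (H : List (List Int)) (i j : Nat) : Int := (H.getD i []).getD j 0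
def pvHset (H : List (List Int)) (i j : Nat) (v : Int) : List (List Int) :=
  H.set i ((H.getD i []).set j v)

def pvDirs : List (Int × Int) := [(0, 1), (1, 0), (0, -1), (-1, 0)]

-- one direction of the inner `for dx, dy in directions` loop body
def pvRelax (m n : Nat) (cur : Int) (x y : Nat)
    (st : List (List Int) × List (Nat × Nat)) (d : Int × Int) :
    List (List Int) × List (Nat × Nat) :=
  let nx : Int := (x : Int) + d.1
  let ny : Int := (y : Int) + d.2
  if 0 ≤ nx ∧ nx < (m : Int) ∧ 0 ≤ ny ∧ ny < (n : Int) then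
    if pvHget st.1 nx.toNat ny.toNat = -1 then
      (pvHset st.1 nx.toNat ny.toNat (cur + 1), st.2 ++ [(nx.toNat, ny.toNat)])
    else st
  else st

-- the `while queue:` loop; fuel m*n+1 always suffices (each iteration removes one queue entry and
-- every cell is enqueued at most once), a totality guard only
def pvBFS (m n : Nat) : Nat → List (List Int) × List (Nat × Nat) → List (List Int)
  | 0, st => st.1
  | fuel + 1, st =>
    match st.2 with
    | [] => st.1
    | (x, y) :: rest =>
      let cur := pvHget st.1 x y
      pvBFS m n fuel (pvDirs.foldl (pvRelax m n cur x y) (st.1, rest))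

-- the initial double loop seeding water cells at height 0
def pvInitWater (isWater : List (List Int)) (m n : Nat) :
    List (List Int) × List (Nat × Nat) :=
  (List.range m).foldl (fun st i =>
    (List.range n).foldl (fun st j =>
      if (isWater.getD i []).getD j 0 = 1 then (pvHset st.1 i j 0, st.2 ++ [(i, j)])
      else st) st)
    (List.replicate m (List.replicate n (-1)), [])

def highestPeak (isWater : List (List Int)) : List (List Int) :=
  match isWater with
  | [] => []  -- Python raises IndexError on `len(isWater[0])` here; excluded by Pre_
  | r0 :: _ =>
    let m := isWater.length
    let n := r0.length
    pvBFS m n (m * n + 1) (pvInitWater isWater m n)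

-- ===== PORT B =====
-- the `waters` comprehension, row-major
def pvWaters (isWater : List (List Int)) (m n : Nat) : List (Nat × Nat) :=
  (List.range m).flatMap (fun i =>
    (List.range n).filterMap (fun j =>
      if (isWater.getD i []).getD j 0 = 1 then some (i, j) else none))

def highestPeak_alt (isWater : List (List Int)) : List (List Int) :=
  match isWater with
  | [] => []  -- Python raises IndexError here as well; excluded by Pre_
  | r0 :: _ =>
    let m := isWater.length
    let n := r0.length
    let ws := pvWaters isWater m n
    if ws.isEmpty then (List.range m).map (fun _ => List.replicate n (-1))
    else
      (List.range m).map (fun (i : Nat) =>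
        (List.range n).map (fun (j : Nat) =>
          ((PySem.List.min?
              (ws.map (fun p => |(i : Int) - (p.1 : Int)| + |(j : Int) - (p.2 : Int)|))
              (fun v => v)).getD 0)))

-- ===== PRECONDITION & SPEC =====
-- Pre_ excludes exactly the inputs on which the Python A raises IndexError: the empty grid
-- (len(isWater[0])) and ragged grids with a row shorter than row 0 (isWater[i][j] lookups).
def Pre_highestPeak (isWater : List (List Int)) : Prop :=
  isWater ≠ [] ∧ ∀ r ∈ isWater, (isWater.headD []).length ≤ r.length
instance (isWater : List (List Int)) : Decidable (Pre_highestPeak isWater) := by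
  unfold Pre_highestPeak; infer_instance

def pvWitness_highestPeak : List (List Int) := [[1, 0, 0], [0, 0, 0]]

def Spec_highestPeak (isWater : List (List Int)) (out : List (List Int)) : Prop := out = highestPeak_alt isWater
instance (isWater : List (List Int)) (out : List (List Int)) : Decidable (Spec_highestPeak isWater out) := by unfold Spec_highestPeak; infer_instance

-- ===== CLAIM (what is proved, stated in full; the proofs are below) =====
def Claim_equal_highestPeak : Prop := ∀ (isWater : List (List Int)), Dom_highestPeak isWater → Pre_highestPeak isWater → Spec_highestPeak isWater (highestPeak isWater)

-- ===== LEMMAS AND PROOFS =====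

-- proof-side vocabulary -------------------------------------------------------
def pvIn (m n : Nat) (c : Nat × Nat) : Prop := c.1 < m ∧ c.2 < n

def pvAdj (a b : Nat × Nat) : Prop :=
  (a.1 = b.1 ∧ Nat.dist a.2 b.2 = 1) ∨ (a.2 = b.2 ∧ Nat.dist a.1 b.1 = 1)

def pvDist (c w : Nat × Nat) : Nat := Nat.dist c.1 w.1 + Nat.dist c.2 w.2

-- the set of water cells of the grid
def pvWt (isWater : List (List Int)) (m n : Nat) : Finset (Nat × Nat) :=
  ((Finset.range m) ×ˢ (Finset.range n)).filter (fun c => (isWater.getD c.1 []).getD c.2 0 = 1)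

-- distance-to-nearest-water function
noncomputable def pvD (Wt : Finset (Nat × Nat)) (c : Nat × Nat) : Nat :=
  sInf {d | ∃ w ∈ Wt, d = pvDist c w}

def pvShape (m n : Nat) (H : List (List Int)) : Prop :=
  H.length = m ∧ ∀ r ∈ H, r.length = n

-- number of still-unassigned cells (the BFS potential, together with the queue length)
def pvUA (m n : Nat) (H : List (List Int)) : Nat :=
  (((Finset.range m) ×ˢ (Finset.range n)).filter (fun c => pvHget H c.1 c.2 = -1)).card

-- the BFS loop invariant
structure pvInv (m n : Nat) (Wt : Finset (Nat × Nat))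
    (H : List (List Int)) (q : List (Nat × Nat)) : Prop where
  shape : pvShape m n H
  correct : ∀ i j, i < m → j < n → pvHget H i j ≠ -1 → pvHget H i j = (pvD Wt (i, j) : Int)
  water_asn : ∀ c ∈ Wt, pvHget H c.1 c.2 ≠ -1
  inq : ∀ c ∈ q, c.1 < m ∧ c.2 < n ∧ pvHget H c.1 c.2 ≠ -1
  nodup : q.Nodup
  sorted : q.Pairwise (fun a b => pvD Wt a ≤ pvD Wt b)
  spread : ∀ a ∈ q, ∀ b ∈ q, pvD Wt b ≤ pvD Wt a + 1
  procd : ∀ i j, i < m → j < n → pvHget H i j ≠ -1 → (i, j) ∉ q →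
    ∀ y, pvAdj (i, j) y → y.1 < m → y.2 < n → pvHget H y.1 y.2 ≠ -1
  lower : ∀ i j, i < m → j < n → pvHget H i j = -1 → ∀ e ∈ q, pvD Wt e ≤ pvD Wt (i, j)


-- ---- grid get/set lemmas ----------------------------------------------------
theorem pvHget_replicate (m n : Nat) (i j : Nat) (hi : i < m) (hj : j < n) :
    pvHget (List.replicate m (List.replicate n (-1 : Int))) i j = -1 := by
  simp [pvHget, List.getD_eq_getElem?_getD, hi, hj]

theorem pvRow_len (m n : Nat) (H : List (List Int)) (i : Nat)
    (h : pvShape m n H) (hi : i < m) : (H.getD i []).length = n := by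
  obtain ⟨h1, h2⟩ := h
  have hiH : i < H.length := by omega
  rw [List.getD_eq_getElem?_getD, List.getElem?_eq_getElem hiH]
  exact h2 _ (by simpa using List.getElem_mem hiH)

theorem pvShape_set (m n : Nat) (H : List (List Int)) (i j : Nat) (v : Int)
    (h : pvShape m n H) (hi : i < m) : pvShape m n (pvHset H i j v) := by
  refine ⟨by simpa [pvHset] using h.1, ?_⟩
  intro r hr
  rcases List.mem_or_eq_of_mem_set hr with hmem | rfl
  · exact h.2 r hmem
  · simpa using pvRow_len m n H i h hi

theorem pvHget_set_self (m n : Nat) (H : List (List Int)) (i j : Nat) (v : Int)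
    (h : pvShape m n H) (hi : i < m) (hj : j < n) :
    pvHget (pvHset H i j v) i j = v := by
  have hiH : i < H.length := by have := h.1; omega
  have hrow : j < (H.getD i []).length := by rw [pvRow_len m n H i h hi]; omega
  unfold pvHget pvHset
  simp only [List.getD_eq_getElem?_getD]
  rw [List.getElem?_set_self hiH]
  simp only [Option.getD_some]
  rw [List.getElem?_set_self (by simpa using hrow)]
  rfl

theorem pvHget_set_ne (H : List (List Int)) (i j i' j' : Nat) (v : Int)
    (h : (i', j') ≠ (i, j)) :
    pvHget (pvHset H i j v) i' j' = pvHget H i' j' := by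
  by_cases hii : i' = i
  · subst hii
    have hjj : j ≠ j' := by intro hh; exact h (by simp [hh])
    by_cases hiH : i' < H.length
    · unfold pvHget pvHset
      simp only [List.getD_eq_getElem?_getD]
      rw [List.getElem?_set_self hiH]
      simp only [Option.getD_some]
      rw [List.getElem?_set_ne hjj]
    · have hset : H.set i' ((H.getD i' []).set j v) = H := by
        apply List.set_eq_of_length_le; omega
      unfold pvHget pvHset
      rw [hset]
  · unfold pvHget pvHset
    simp only [List.getD_eq_getElem?_getD]
    rw [List.getElem?_set_ne (fun hh => hii hh.symm)]

-- ---- counting unassigned cells ---------------------------------------------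
theorem pvUA_set (m n : Nat) (H : List (List Int)) (i j : Nat) (v : Int)
    (hsh : pvShape m n H) (hi : i < m) (hj : j < n)
    (hun : pvHget H i j = -1) (hv : v ≠ -1) :
    pvUA m n (pvHset H i j v) + 1 = pvUA m n H := by
  have hmem : (i, j) ∈ ((Finset.range m) ×ˢ (Finset.range n)).filter
      (fun c => pvHget H c.1 c.2 = -1) := by
    simp [Finset.mem_filter, Finset.mem_product, hi, hj, hun]
  have hset : ((Finset.range m) ×ˢ (Finset.range n)).filter
        (fun c => pvHget (pvHset H i j v) c.1 c.2 = -1) =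
      (((Finset.range m) ×ˢ (Finset.range n)).filter
        (fun c => pvHget H c.1 c.2 = -1)).erase (i, j) := by
    ext c
    by_cases hc : c = (i, j)
    · subst hc
      simp [Finset.mem_filter, pvHget_set_self m n H i j v hsh hi hj, hv]
    · have : pvHget (pvHset H i j v) c.1 c.2 = pvHget H c.1 c.2 := by
        have : (c.1, c.2) ≠ (i, j) := by simpa using hc
        exact pvHget_set_ne H i j c.1 c.2 v this
      simp [Finset.mem_filter, Finset.mem_erase, hc, this]
  unfold pvUA
  rw [hset]
  exact Finset.card_erase_add_one hmem

theorem pvUA_zero (m n : Nat) (H : List (List Int)) (h : pvUA m n H = 0) :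
    ∀ i j, i < m → j < n → pvHget H i j ≠ -1 := by
  intro i j hi hj hcon
  unfold pvUA at h
  rw [Finset.card_eq_zero] at h
  have : (i, j) ∈ (∅ : Finset (Nat × Nat)) := by
    rw [← h]; simp [Finset.mem_filter, Finset.mem_product, hi, hj, hcon]
  simp at this

-- ---- distance function lemmas ----------------------------------------------
theorem pvD_le (Wt : Finset (Nat × Nat)) (c w : Nat × Nat) (hw : w ∈ Wt) :
    pvD Wt c ≤ pvDist c w :=
  Nat.sInf_le ⟨w, hw, rfl⟩

theorem pvD_exists (Wt : Finset (Nat × Nat)) (c : Nat × Nat) (hne : Wt.Nonempty) :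
    ∃ w ∈ Wt, pvD Wt c = pvDist c w := by
  obtain ⟨w0, hw0⟩ := hne
  have : pvD Wt c ∈ {d | ∃ w ∈ Wt, d = pvDist c w} :=
    Nat.sInf_mem ⟨pvDist c w0, w0, hw0, rfl⟩
  obtain ⟨w, hw, he⟩ := this
  exact ⟨w, hw, he⟩

theorem pvD_zero_of_mem (Wt : Finset (Nat × Nat)) (c : Nat × Nat) (hc : c ∈ Wt) :
    pvD Wt c = 0 := by
  have := pvD_le Wt c c hc
  simp [pvDist, Nat.dist_self] at this
  omega

theorem pvD_zero_mem (Wt : Finset (Nat × Nat)) (c : Nat × Nat) (hne : Wt.Nonempty)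
    (h : pvD Wt c = 0) : c ∈ Wt := by
  obtain ⟨w, hw, he⟩ := pvD_exists Wt c hne
  have : pvDist c w = 0 := by omega
  have hc : c = w := by
    obtain ⟨a, b⟩ := c; obtain ⟨a', b'⟩ := w
    simp [pvDist, Nat.dist] at this
    simp; omega
  rwa [hc]

theorem pvD_lip (Wt : Finset (Nat × Nat)) (a b : Nat × Nat) (hne : Wt.Nonempty)
    (hadj : pvAdj a b) : pvD Wt b ≤ pvD Wt a + 1 := by
  obtain ⟨w, hw, he⟩ := pvD_exists Wt a hne
  have hd : pvDist b w ≤ pvDist a w + 1 := by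
    obtain ⟨a1, a2⟩ := a; obtain ⟨b1, b2⟩ := b; obtain ⟨w1, w2⟩ := w
    rcases hadj with ⟨h1, h2⟩ | ⟨h1, h2⟩ <;> simp_all [pvDist, Nat.dist] <;> omega
  calc pvD Wt b ≤ pvDist b w := pvD_le Wt b w hw
    _ ≤ pvDist a w + 1 := hd
    _ = pvD Wt a + 1 := by omega

theorem pvD_parent (m n : Nat) (Wt : Finset (Nat × Nat)) (c : Nat × Nat)
    (hne : Wt.Nonempty) (hsub : ∀ w ∈ Wt, pvIn m n w) (hc : pvIn m n c)
    (h1 : 1 ≤ pvD Wt c) :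
    ∃ z, pvIn m n z ∧ pvAdj c z ∧ pvD Wt z + 1 = pvD Wt c := by
  obtain ⟨w, hw, he⟩ := pvD_exists Wt c hne
  obtain ⟨hwm, hwn⟩ := hsub w hw
  obtain ⟨c1, c2⟩ := c; obtain ⟨w1, w2⟩ := w
  obtain ⟨hc1, hc2⟩ := hc
  simp only at hc1 hc2 hwm hwn
  by_cases h12 : c1 = w1
  · -- move in the second coordinate
    have hne2 : c2 ≠ w2 := by
      intro hh; subst h12; subst hh; simp [pvDist, Nat.dist_self] at he; omega
    refine ⟨(c1, if w2 < c2 then c2 - 1 else c2 + 1), ?_, ?_, ?_⟩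
    · constructor
      · exact hc1
      · by_cases hlt : w2 < c2 <;> simp only [hlt, if_true, if_false] <;> omega
    · left; constructor
      · rfl
      · by_cases hlt : w2 < c2 <;> simp [hlt, Nat.dist] <;> omega
    · have hzd : pvDist (c1, if w2 < c2 then c2 - 1 else c2 + 1) (w1, w2) + 1 =
          pvDist (c1, c2) (w1, w2) := by
        by_cases hlt : w2 < c2 <;> simp [hlt, pvDist, Nat.dist] <;> omega
      have hle : pvD Wt (c1, if w2 < c2 then c2 - 1 else c2 + 1) + 1 ≤ pvD Wt (c1, c2) := by
        have := pvD_le Wt (c1, if w2 < c2 then c2 - 1 else c2 + 1) (w1, w2) hw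
        omega
      have hge := pvD_lip Wt (c1, if w2 < c2 then c2 - 1 else c2 + 1) (c1, c2) hne
        (by left; refine ⟨rfl, ?_⟩
            by_cases hlt : w2 < c2 <;> simp only [hlt, if_true, if_false, Nat.dist] <;> omega)
      omega
  · -- move in the first coordinate
    refine ⟨(if w1 < c1 then c1 - 1 else c1 + 1, c2), ?_, ?_, ?_⟩
    · constructor
      · by_cases hlt : w1 < c1 <;> simp only [hlt, if_true, if_false] <;> omega
      · exact hc2
    · right; constructor
      · rfl
      · by_cases hlt : w1 < c1 <;> simp [hlt, Nat.dist] <;> omega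
    · have hzd : pvDist (if w1 < c1 then c1 - 1 else c1 + 1, c2) (w1, w2) + 1 =
          pvDist (c1, c2) (w1, w2) := by
        by_cases hlt : w1 < c1 <;> simp [hlt, pvDist, Nat.dist] <;> omega
      have hle : pvD Wt (if w1 < c1 then c1 - 1 else c1 + 1, c2) + 1 ≤ pvD Wt (c1, c2) := by
        have := pvD_le Wt (if w1 < c1 then c1 - 1 else c1 + 1, c2) (w1, w2) hw
        omega
      have hge := pvD_lip Wt (if w1 < c1 then c1 - 1 else c1 + 1, c2) (c1, c2) hne
        (by right; refine ⟨rfl, ?_⟩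
            by_cases hlt : w1 < c1 <;> simp only [hlt, if_true, if_false, Nat.dist] <;> omega)
      omega

theorem pvAdj_symm (a b : Nat × Nat) (h : pvAdj a b) : pvAdj b a := by
  rcases h with ⟨h1, h2⟩ | ⟨h1, h2⟩
  · left; exact ⟨h1.symm, by rwa [Nat.dist_comm]⟩
  · right; exact ⟨h1.symm, by rwa [Nat.dist_comm]⟩

theorem pvAdj_dir (x y : Nat) (c : Nat × Nat) (h : pvAdj (x, y) c) :
    ∃ d ∈ pvDirs, (x : Int) + d.1 = (c.1 : Int) ∧ (y : Int) + d.2 = (c.2 : Int) := by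
  obtain ⟨c1, c2⟩ := c
  rcases h with ⟨h1, h2⟩ | ⟨h1, h2⟩
  · simp [Nat.dist] at h1 h2
    have : c2 = y + 1 ∨ y = c2 + 1 := by omega
    rcases this with hh | hh
    · exact ⟨(0, 1), by simp [pvDirs], by push_cast; omega, by push_cast; omega⟩
    · exact ⟨(0, -1), by simp [pvDirs], by push_cast; omega, by push_cast; omega⟩
  · simp [Nat.dist] at h1 h2
    have : c1 = x + 1 ∨ x = c1 + 1 := by omega
    rcases this with hh | hh
    · exact ⟨(1, 0), by simp [pvDirs], by push_cast; omega, by push_cast; omega⟩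
    · exact ⟨(-1, 0), by simp [pvDirs], by push_cast; omega, by push_cast; omega⟩

theorem pvDir_adj (x y : Nat) (d : Int × Int) (hd : d ∈ pvDirs)
    (h1 : 0 ≤ (x : Int) + d.1) (h2 : 0 ≤ (y : Int) + d.2) :
    pvAdj (x, y) (((x : Int) + d.1).toNat, ((y : Int) + d.2).toNat) := by
  simp [pvDirs] at hd
  rcases hd with rfl | rfl | rfl | rfl
  · exact Or.inl ⟨by omega, by simp only [Nat.dist]; omega⟩
  · exact Or.inr ⟨by omega, by simp only [Nat.dist]; omega⟩
  · exact Or.inl ⟨by omega, by simp only [Nat.dist]; omega⟩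
  · exact Or.inr ⟨by omega, by simp only [Nat.dist]; omega⟩


-- ---- one inner-loop step (`for dx, dy in directions`) ----------------------
theorem pvRelax_cases (m n : Nat) (k x y : Nat)
    (st : List (List Int) × List (Nat × Nat)) (d : Int × Int) (hd : d ∈ pvDirs) :
    pvRelax m n (k : Int) x y st d = st ∨
    ∃ c : Nat × Nat, c.1 < m ∧ c.2 < n ∧ pvAdj (x, y) c ∧ pvHget st.1 c.1 c.2 = -1 ∧
      pvRelax m n (k : Int) x y st d =
        (pvHset st.1 c.1 c.2 ((k : Int) + 1), st.2 ++ [c]) := by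
  unfold pvRelax
  by_cases hb : 0 ≤ (x : Int) + d.1 ∧ (x : Int) + d.1 < (m : Int) ∧
      0 ≤ (y : Int) + d.2 ∧ (y : Int) + d.2 < (n : Int)
  · by_cases hm1 : pvHget st.1 ((x : Int) + d.1).toNat ((y : Int) + d.2).toNat = -1
    · right
      exact ⟨(((x : Int) + d.1).toNat, ((y : Int) + d.2).toNat), by omega, by omega,
        pvDir_adj x y d hd hb.1 hb.2.2.1, hm1, by simp [hb, hm1]⟩
    · left; simp [hb, hm1]
  · left; simp [hb]

theorem pvRelax_shape (m n : Nat) (k x y : Nat)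
    (st : List (List Int) × List (Nat × Nat)) (d : Int × Int) (hd : d ∈ pvDirs)
    (h : pvShape m n st.1) : pvShape m n (pvRelax m n (k : Int) x y st d).1 := by
  rcases pvRelax_cases m n k x y st d hd with he | ⟨c, hc1, hc2, _, _, he⟩
  · rw [he]; exact h
  · rw [he]; exact pvShape_set m n st.1 c.1 c.2 _ h hc1

theorem pvRelax_mono (m n : Nat) (k x y : Nat)
    (st : List (List Int) × List (Nat × Nat)) (d : Int × Int) (hd : d ∈ pvDirs)
    (i j : Nat) (h : pvHget st.1 i j ≠ -1) :
    pvHget (pvRelax m n (k : Int) x y st d).1 i j = pvHget st.1 i j := by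
  rcases pvRelax_cases m n k x y st d hd with he | ⟨c, hc1, hc2, _, hun, he⟩
  · rw [he]
  · rw [he]
    apply pvHget_set_ne
    intro hh
    rw [Prod.mk.injEq] at hh
    exact h (by rw [hh.1, hh.2]; exact hun)

theorem pvFold_mono (m n : Nat) (k x y : Nat) :
    ∀ (ds : List (Int × Int)), (∀ d ∈ ds, d ∈ pvDirs) →
    ∀ (st : List (List Int) × List (Nat × Nat)) (i j : Nat), pvHget st.1 i j ≠ -1 →
    pvHget (ds.foldl (pvRelax m n (k : Int) x y) st).1 i j = pvHget st.1 i j := by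
  intro ds
  induction ds with
  | nil => intro _ st i j h; simp
  | cons d ds ih =>
    intro hds st i j h
    have hd := hds d (by simp)
    rw [List.foldl_cons]
    rw [ih (fun e he => hds e (by simp [he])) _ i j
      (by rw [pvRelax_mono m n k x y st d hd i j h]; exact h)]
    exact pvRelax_mono m n k x y st d hd i j h

-- after the whole direction loop, every in-bounds neighbour of (x,y) is assigned
theorem pvFold_covers (m n : Nat) (k x y : Nat) :
    ∀ (ds : List (Int × Int)), (∀ d ∈ ds, d ∈ pvDirs) →
    ∀ (st : List (List Int) × List (Nat × Nat)), pvShape m n st.1 →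
    ∀ d ∈ ds, ∀ (h1 : 0 ≤ (x : Int) + d.1) (h2 : (x : Int) + d.1 < (m : Int))
      (h3 : 0 ≤ (y : Int) + d.2) (h4 : (y : Int) + d.2 < (n : Int)),
    pvHget (ds.foldl (pvRelax m n (k : Int) x y) st).1
      ((x : Int) + d.1).toNat ((y : Int) + d.2).toNat ≠ -1 := by
  intro ds
  induction ds with
  | nil => intro _ _ _ d hd; simp at hd
  | cons d0 ds ih =>
    intro hds st hsh d hd h1 h2 h3 h4
    rw [List.foldl_cons]
    have htail : ∀ e ∈ ds, e ∈ pvDirs := fun e he => hds e (by simp [he])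
    have hsh' : pvShape m n (pvRelax m n (k : Int) x y st d0).1 :=
      pvRelax_shape m n k x y st d0 (hds d0 (by simp)) hsh
    rcases List.mem_cons.mp hd with rfl | hmem
    · -- the head direction's neighbour is assigned right away, and stays assigned
      have hstep : pvHget (pvRelax m n (k : Int) x y st d).1
          ((x : Int) + d.1).toNat ((y : Int) + d.2).toNat ≠ -1 := by
        by_cases hm1 : pvHget st.1 ((x : Int) + d.1).toNat ((y : Int) + d.2).toNat = -1
        · have : pvRelax m n (k : Int) x y st d =
              (pvHset st.1 ((x : Int) + d.1).toNat ((y : Int) + d.2).toNat ((k : Int) + 1),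
               st.2 ++ [(((x : Int) + d.1).toNat, ((y : Int) + d.2).toNat)]) := by
            unfold pvRelax
            simp [h1, h2, h3, h4, hm1]
          rw [this]
          rw [pvHget_set_self m n st.1 _ _ _ hsh (by omega) (by omega)]
          omega
        · rw [pvRelax_mono m n k x y st d (hds d (by simp)) _ _ hm1]
          exact hm1
      rw [pvFold_mono m n k x y ds htail _ _ _ hstep]
      exact hstep
    · exact ih htail _ hsh' d hmem h1 h2 h3 h4

-- ---- the frontier-expansion invariant over the direction loop --------------
structure pvMid (m n x y k : Nat) (H0 H : List (List Int)) (p : List (Nat × Nat)) : Prop where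
  shape : pvShape m n H
  pt : ∀ i j, i < m → j < n →
      (pvHget H i j = pvHget H0 i j ∧ (i, j) ∉ p) ∨
      (pvHget H0 i j = -1 ∧ pvHget H i j = (k : Int) + 1 ∧ pvAdj (x, y) (i, j) ∧ (i, j) ∈ p)
  mem : ∀ c ∈ p, c.1 < m ∧ c.2 < n
  nodup : p.Nodup
  ua : pvUA m n H + p.length = pvUA m n H0

theorem pvMid_step (m n x y k : Nat) (H0 H : List (List Int)) (p rest : List (Nat × Nat))
    (d : Int × Int) (hd : d ∈ pvDirs) (hmid : pvMid m n x y k H0 H p) :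
    ∃ p', pvMid m n x y k H0 (pvRelax m n (k : Int) x y (H, rest ++ p) d).1 p' ∧
      (pvRelax m n (k : Int) x y (H, rest ++ p) d).2 = rest ++ p' := by
  rcases pvRelax_cases m n k x y (H, rest ++ p) d hd with he | ⟨c, hc1, hc2, hadj, hun, he⟩
  · exact ⟨p, by rw [he]; exact hmid, by rw [he]⟩
  · obtain ⟨cA, cB⟩ := c
    simp only at hun he hc1 hc2
    have hcp : (cA, cB) ∉ p := by
      intro hin
      rcases hmid.pt cA cB hc1 hc2 with ⟨_, hnotin⟩ | ⟨_, hval, _, _⟩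
      · exact hnotin hin
      · rw [hun] at hval; omega
    refine ⟨p ++ [(cA, cB)], ?_, by rw [he]; simp⟩
    rw [he]
    refine ⟨pvShape_set m n H cA cB _ hmid.shape hc1, ?_, ?_, ?_, ?_⟩
    · intro i j hi hj
      by_cases hc : (i, j) = (cA, cB)
      · rw [Prod.mk.injEq] at hc
        obtain ⟨rfl, rfl⟩ := hc
        right
        have h0 : pvHget H0 i j = -1 := by
          rcases hmid.pt i j hi hj with ⟨heq, _⟩ | ⟨_, _, _, hin⟩
          · rw [← heq]; exact hun
          · exact absurd hin hcp
        exact ⟨h0, pvHget_set_self m n H i j _ hmid.shape hc1 hc2, hadj, by simp⟩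
      · have hval : pvHget (pvHset H cA cB ((k : Int) + 1), rest ++ p ++ [(cA, cB)]).1 i j =
            pvHget H i j := pvHget_set_ne H cA cB i j _ hc
        rcases hmid.pt i j hi hj with ⟨heq, hnotin⟩ | ⟨h0, hv, hadj', hin⟩
        · left
          refine ⟨by rw [hval, heq], ?_⟩
          simp only [List.mem_append, List.mem_singleton]
          rintro (hh | hh)
          · exact hnotin hh
          · exact hc hh
        · right
          exact ⟨h0, by rw [hval, hv], hadj', by simp [hin]⟩
    · intro e hee
      rcases List.mem_append.mp hee with hh | hh
      · exact hmid.mem e hh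
      · rw [List.mem_singleton.mp hh]; exact ⟨hc1, hc2⟩
    · exact List.Nodup.append hmid.nodup (List.nodup_singleton _)
        (by simpa using hcp)
    · have h1 := pvUA_set m n H cA cB ((k : Int) + 1) hmid.shape hc1 hc2 hun (by omega)
      have h2 := hmid.ua
      simp only [List.length_append, List.length_singleton]
      omega

theorem pvMid_fold (m n x y k : Nat) (H0 : List (List Int)) (rest : List (Nat × Nat)) :
    ∀ (ds : List (Int × Int)), (∀ d ∈ ds, d ∈ pvDirs) →
    ∀ (H : List (List Int)) (p : List (Nat × Nat)), pvMid m n x y k H0 H p →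
    ∃ p', pvMid m n x y k H0 (ds.foldl (pvRelax m n (k : Int) x y) (H, rest ++ p)).1 p' ∧
      (ds.foldl (pvRelax m n (k : Int) x y) (H, rest ++ p)).2 = rest ++ p' := by
  intro ds
  induction ds with
  | nil => intro _ H p hmid; exact ⟨p, hmid, rfl⟩
  | cons d ds ih =>
    intro hds H p hmid
    obtain ⟨p1, hmid1, hq1⟩ := pvMid_step m n x y k H0 H p rest d (hds d (by simp)) hmid
    rw [List.foldl_cons]
    have hst : pvRelax m n (k : Int) x y (H, rest ++ p) d =
        ((pvRelax m n (k : Int) x y (H, rest ++ p) d).1, rest ++ p1) := by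
      rw [← hq1]
    rw [hst]
    exact ih (fun e he => hds e (by simp [he])) _ p1 hmid1


-- ---- consequences of the BFS invariant -------------------------------------
theorem pvPop_no_low (m n : Nat) (Wt : Finset (Nat × Nat)) (hne : Wt.Nonempty)
    (hsub : ∀ w ∈ Wt, pvIn m n w) (H : List (List Int)) (x : Nat × Nat)
    (rest : List (Nat × Nat)) (inv : pvInv m n Wt H (x :: rest)) :
    ∀ c : Nat × Nat, pvIn m n c → pvHget H c.1 c.2 = -1 → pvD Wt x < pvD Wt c := by
  intro c hc hun
  have hle : pvD Wt x ≤ pvD Wt c :=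
    inv.lower c.1 c.2 hc.1 hc.2 hun x (by simp)
  rcases Nat.lt_or_ge (pvD Wt x) (pvD Wt c) with h | h
  · exact h
  exfalso
  have hk : pvD Wt c = pvD Wt x := by omega
  by_cases h0 : pvD Wt c = 0
  · have hw : c ∈ Wt := pvD_zero_mem Wt c hne h0
    exact inv.water_asn c hw hun
  · obtain ⟨z, hzin, hzadj, hzD⟩ := pvD_parent m n Wt c hne hsub hc (by omega)
    have heqz : pvD Wt (z.1, z.2) = pvD Wt z := by rw [Prod.mk.eta]
    have hzasn : pvHget H z.1 z.2 ≠ -1 := by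
      intro hzun
      have := inv.lower z.1 z.2 hzin.1 hzin.2 hzun x (by simp)
      omega
    have hznq : z ∉ x :: rest := by
      intro hzq
      rcases List.mem_cons.mp hzq with rfl | hzrest
      · omega
      · have := (List.pairwise_cons.mp inv.sorted).1 z hzrest
        omega
    have := inv.procd z.1 z.2 hzin.1 hzin.2 hzasn (by simpa using hznq)
      c (pvAdj_symm c z hzadj) hc.1 hc.2
    exact this hun

theorem pvEmpty_done (m n : Nat) (Wt : Finset (Nat × Nat)) (hne : Wt.Nonempty)
    (hsub : ∀ w ∈ Wt, pvIn m n w) (H : List (List Int))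
    (inv : pvInv m n Wt H []) :
    ∀ i j, i < m → j < n → pvHget H i j ≠ -1 := by
  suffices h : ∀ k i j, i < m → j < n → pvD Wt (i, j) = k → pvHget H i j ≠ -1 by
    intro i j hi hj
    exact h (pvD Wt (i, j)) i j hi hj rfl
  intro k
  induction k using Nat.strong_induction_on with
  | _ k ih =>
    intro i j hi hj hD hun
    by_cases h0 : k = 0
    · subst h0
      exact inv.water_asn (i, j) (pvD_zero_mem Wt (i, j) hne hD) hun
    · obtain ⟨z, hzin, hzadj, hzD⟩ :=
        pvD_parent m n Wt (i, j) hne hsub ⟨hi, hj⟩ (by omega)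
      have heqz : pvD Wt (z.1, z.2) = pvD Wt z := by rw [Prod.mk.eta]
      have hzasn : pvHget H z.1 z.2 ≠ -1 :=
        ih (pvD Wt (z.1, z.2)) (by omega) z.1 z.2 hzin.1 hzin.2 rfl
      exact inv.procd z.1 z.2 hzin.1 hzin.2 hzasn (by simp)
        (i, j) (pvAdj_symm (i, j) z hzadj) hi hj hun


-- ---- the BFS loop computes the distance transform --------------------------
theorem pvBFS_run (m n : Nat) (Wt : Finset (Nat × Nat)) (hne : Wt.Nonempty)
    (hsub : ∀ w ∈ Wt, pvIn m n w) :
    ∀ (fuel : Nat) (H : List (List Int)) (q : List (Nat × Nat)),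
    pvInv m n Wt H q → pvUA m n H + q.length ≤ fuel →
    pvShape m n (pvBFS m n fuel (H, q)) ∧
    ∀ i j, i < m → j < n → pvHget (pvBFS m n fuel (H, q)) i j = (pvD Wt (i, j) : Int) := by
  intro fuel
  induction fuel with
  | zero =>
    intro H q inv hfuel
    have hua : pvUA m n H = 0 := by omega
    exact ⟨inv.shape, fun i j hi hj =>
      inv.correct i j hi hj (pvUA_zero m n H hua i j hi hj)⟩
  | succ fuel ih =>
    intro H q inv hfuel
    rcases q with _ | ⟨⟨x, y⟩, rest⟩
    · have hdone := pvEmpty_done m n Wt hne hsub H inv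
      have hbfs : pvBFS m n (fuel + 1) (H, []) = H := rfl
      rw [hbfs]
      exact ⟨inv.shape, fun i j hi hj => inv.correct i j hi hj (hdone i j hi hj)⟩
    · set k := pvD Wt (x, y) with hkdef
      have hxq : (x, y) ∈ (x, y) :: rest := by simp
      obtain ⟨hxm, hyn, hxasn⟩ := inv.inq (x, y) hxq
      have hcur : pvHget H x y = (k : Int) := inv.correct x y hxm hyn hxasn
      have hbfs : pvBFS m n (fuel + 1) (H, (x, y) :: rest) =
          pvBFS m n fuel (pvDirs.foldl (pvRelax m n (pvHget H x y) x y) (H, rest)) := rfl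
      rw [hbfs, hcur]
      have hmid0 : pvMid m n x y k H H [] :=
        ⟨inv.shape, fun i j _ _ => Or.inl ⟨rfl, by simp⟩, by simp, List.nodup_nil, by simp⟩
      obtain ⟨p', hmidF, hqF⟩ :=
        pvMid_fold m n x y k H rest pvDirs (fun d hd => hd) H [] hmid0
      rw [List.append_nil] at hmidF hqF
      set st := pvDirs.foldl (pvRelax m n (k : Int) x y) (H, rest) with hstdef
      have hDp : ∀ c ∈ p', pvHget H c.1 c.2 = -1 ∧ pvAdj (x, y) c ∧
          c.1 < m ∧ c.2 < n ∧ pvD Wt c = k + 1 := by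
        intro c hcp
        obtain ⟨hc1, hc2⟩ := hmidF.mem c hcp
        rcases hmidF.pt c.1 c.2 hc1 hc2 with ⟨_, hnotin⟩ | ⟨h0, hv, hadj, _⟩
        · rw [Prod.mk.eta] at hnotin
          exact absurd hcp hnotin
        · have hadj' : pvAdj (x, y) c := by rwa [Prod.mk.eta] at hadj
          have hup : pvD Wt c ≤ k + 1 := pvD_lip Wt (x, y) c hne hadj'
          have hlow := pvPop_no_low m n Wt hne hsub H (x, y) rest inv c ⟨hc1, hc2⟩ h0
          exact ⟨h0, hadj', hc1, hc2, by omega⟩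
      have hval : ∀ i j, i < m → j < n →
          (pvHget st.1 i j = pvHget H i j ∧ (i, j) ∉ p') ∨
          (pvHget H i j = -1 ∧ pvHget st.1 i j = (k : Int) + 1 ∧ (i, j) ∈ p') := by
        intro i j hi hj
        rcases hmidF.pt i j hi hj with ⟨h1, h2⟩ | ⟨h1, h2, _, h4⟩
        · exact Or.inl ⟨h1, h2⟩
        · exact Or.inr ⟨h1, h2, h4⟩
      have hqD : ∀ e ∈ rest ++ p', k ≤ pvD Wt e ∧ pvD Wt e ≤ k + 1 := by
        intro e he
        rcases List.mem_append.mp he with he | he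
        · exact ⟨(List.pairwise_cons.mp inv.sorted).1 e he,
            inv.spread (x, y) hxq e (by simp [he])⟩
        · have := (hDp e he).2.2.2.2; omega
      have inv' : pvInv m n Wt st.1 (rest ++ p') := by
        refine ⟨hmidF.shape, ?_, ?_, ?_, ?_, ?_, ?_, ?_, ?_⟩
        · -- correct
          intro i j hi hj hasn
          rcases hval i j hi hj with ⟨h1, _⟩ | ⟨_, h2, h3⟩
          · rw [h1]; exact inv.correct i j hi hj (by rwa [h1] at hasn)
          · rw [h2]
            have := (hDp (i, j) h3).2.2.2.2
            rw [this]; push_cast; ring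
        · -- water_asn
          intro c hcw
          obtain ⟨hc1, hc2⟩ := hsub c hcw
          rcases hval c.1 c.2 hc1 hc2 with ⟨h1, _⟩ | ⟨_, h2, _⟩
          · rw [h1]; exact inv.water_asn c hcw
          · rw [h2]; omega
        · -- inq
          intro c hc
          rcases List.mem_append.mp hc with he | he
          · obtain ⟨h1, h2, h3⟩ := inv.inq c (by simp [he])
            refine ⟨h1, h2, ?_⟩
            rcases hval c.1 c.2 h1 h2 with ⟨hv, _⟩ | ⟨hv, _, _⟩
            · rw [hv]; exact h3
            · exact absurd hv h3
          · obtain ⟨h0, hadj, h1, h2, hD⟩ := hDp c he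
            refine ⟨h1, h2, ?_⟩
            rcases hval c.1 c.2 h1 h2 with ⟨_, hnot⟩ | ⟨_, hv, _⟩
            · rw [Prod.mk.eta] at hnot; exact absurd he hnot
            · rw [hv]; omega
        · -- nodup
          refine List.Nodup.append inv.nodup.of_cons hmidF.nodup ?_
          intro a ha hap'
          obtain ⟨_, _, h3⟩ := inv.inq a (by simp [ha])
          exact h3 (hDp a hap').1
        · -- sorted
          rw [List.pairwise_append]
          refine ⟨inv.sorted.of_cons, ?_, ?_⟩
          · apply List.pairwise_of_forall_mem_list
            intro a ha b hb
            have h1 := (hDp a ha).2.2.2.2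
            have h2 := (hDp b hb).2.2.2.2
            omega
          · intro a ha b hb
            have h1 := hqD a (List.mem_append.mpr (Or.inl ha))
            have h2 := (hDp b hb).2.2.2.2
            omega
        · -- spread
          intro a ha b hb
          have h1 := hqD a ha
          have h2 := hqD b hb
          omega
        · -- procd
          intro i j hi hj hasn hnotin y' hadj hy1 hy2
          by_cases hij : (i, j) = (x, y)
          · rw [Prod.mk.injEq] at hij
            obtain ⟨rfl, rfl⟩ := hij
            obtain ⟨d, hd, hdx, hdy⟩ := pvAdj_dir i j y' hadj
            have hy1' : (y'.1 : Int) < (m : Int) := by exact_mod_cast hy1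
            have hy2' : (y'.2 : Int) < (n : Int) := by exact_mod_cast hy2
            have hcov := pvFold_covers m n k i j pvDirs (fun d hd => hd) (H, rest)
              inv.shape d hd (by omega) (by omega) (by omega) (by omega)
            rw [← hstdef] at hcov
            have e1 : ((i : Int) + d.1).toNat = y'.1 := by omega
            have e2 : ((j : Int) + d.2).toNat = y'.2 := by omega
            rw [e1, e2] at hcov
            exact hcov
          · have hasnH : pvHget H i j ≠ -1 := by
              rcases hval i j hi hj with ⟨h1, _⟩ | ⟨_, _, h3⟩
              · rwa [h1] at hasn
              · exact absurd (List.mem_append.mpr (Or.inr h3)) hnotin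
            have hnotold : (i, j) ∉ (x, y) :: rest := by
              intro hh
              rcases List.mem_cons.mp hh with hh | hh
              · exact hij hh
              · exact hnotin (List.mem_append.mpr (Or.inl hh))
            have hold := inv.procd i j hi hj hasnH hnotold y' hadj hy1 hy2
            rcases hval y'.1 y'.2 hy1 hy2 with ⟨h1, _⟩ | ⟨_, h2, _⟩
            · rw [h1]; exact hold
            · rw [h2]; omega
        · -- lower
          intro i j hi hj hun e he
          have hunH : pvHget H i j = -1 := by
            rcases hval i j hi hj with ⟨h1, _⟩ | ⟨_, h2, _⟩
            · rwa [h1] at hun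
            · exfalso; rw [h2] at hun; omega
          have hlow := pvPop_no_low m n Wt hne hsub H (x, y) rest inv (i, j) ⟨hi, hj⟩ hunH
          have := hqD e he
          omega
      have hbound : pvUA m n st.1 + (rest ++ p').length ≤ fuel := by
        have h1 := hmidF.ua
        have h2 : (rest ++ p').length = rest.length + p'.length := by simp
        have h3 : ((x, y) :: rest).length = rest.length + 1 := rfl
        rw [h3] at hfuel
        omega
      have hst2 : st = (st.1, rest ++ p') := by
        rw [← hqF]
      rw [hst2]
      exact ih st.1 (rest ++ p') inv' hbound


-- ---- the initial water-seeding loop and the water list ----------------------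
def pvWb (isW : List (List Int)) : (Nat × Nat) → Bool := fun c => decide ((isW.getD c.1 []).getD c.2 0 = 1)

def pvGridL (m n : Nat) : List (Nat × Nat) := List.range m ×ˢ List.range n

theorem pvGridL_mem (m n i j : Nat) : (i, j) ∈ pvGridL m n ↔ i < m ∧ j < n := by
  simp [pvGridL, List.mem_product]

theorem pvGridL_nodup (m n : Nat) : (pvGridL m n).Nodup :=
  List.Nodup.product List.nodup_range List.nodup_range

theorem pvFilterMap_filter {α β : Type} (P : α → Prop) [DecidablePred P] (g : α → β) :
    ∀ l : List α, l.filterMap (fun a => if P a then some (g a) else none) =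
      (l.filter (fun a => decide (P a))).map g := by
  intro l
  induction l with
  | nil => rfl
  | cons a t ih => by_cases h : P a <;> simp [h, ih]

theorem pvInit_foldPairs (isW : List (List Int)) (m n : Nat) :
    ∀ (L : List (Nat × Nat)) (H : List (List Int)) (q : List (Nat × Nat)),
    pvShape m n H → (∀ c ∈ L, pvIn m n c) →
    pvShape m n (L.foldl (fun st (c : Nat × Nat) =>
        if (isW.getD c.1 []).getD c.2 0 = 1 then (pvHset st.1 c.1 c.2 0, st.2 ++ [c])
        else st) (H, q)).1 ∧
    (L.foldl (fun st (c : Nat × Nat) =>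
        if (isW.getD c.1 []).getD c.2 0 = 1 then (pvHset st.1 c.1 c.2 0, st.2 ++ [c])
        else st) (H, q)).2 = q ++ L.filter (pvWb isW) ∧
    (∀ i j, i < m → j < n →
      pvHget (L.foldl (fun st (c : Nat × Nat) =>
        if (isW.getD c.1 []).getD c.2 0 = 1 then (pvHset st.1 c.1 c.2 0, st.2 ++ [c])
        else st) (H, q)).1 i j =
        if (i, j) ∈ L ∧ (isW.getD i []).getD j 0 = 1 then 0 else pvHget H i j) := by
  intro L
  induction L with
  | nil =>
    intro H q hsh _
    refine ⟨hsh, by simp, ?_⟩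
    intro i j _ _
    simp
  | cons c L ih =>
    intro H q hsh hL
    obtain ⟨cA, cB⟩ := c
    obtain ⟨hc1, hc2⟩ := hL (cA, cB) (by simp)
    simp only at hc1 hc2
    have hLtail : ∀ e ∈ L, pvIn m n e := fun e he => hL e (by simp [he])
    rw [List.foldl_cons]
    by_cases hw : (isW.getD cA []).getD cB 0 = 1
    · simp only [hw, if_true]
      have hsh1 : pvShape m n (pvHset H cA cB 0) := pvShape_set m n H cA cB 0 hsh hc1
      obtain ⟨g1, g2, g3⟩ := ih (pvHset H cA cB 0) (q ++ [(cA, cB)]) hsh1 hLtail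
      refine ⟨g1, ?_, ?_⟩
      · rw [g2]
        have hb : pvWb isW (cA, cB) = true := by
          unfold pvWb; rw [decide_eq_true_eq]; exact hw
        simp [List.filter_cons, hb, List.append_assoc]
      · intro i j hi hj
        rw [g3 i j hi hj]
        by_cases hij : (i, j) = (cA, cB)
        · rw [Prod.mk.injEq] at hij
          obtain ⟨rfl, rfl⟩ := hij
          have hwij : (isW.getD i []).getD j 0 = 1 := hw
          have hset : pvHget (pvHset H i j 0) i j = 0 :=
            pvHget_set_self m n H i j 0 hsh hc1 hc2
          by_cases hmem : (i, j) ∈ L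
          · rw [if_pos ⟨hmem, hwij⟩, if_pos ⟨by simp, hwij⟩]
          · rw [if_neg (fun hh => hmem hh.1), if_pos ⟨by simp, hwij⟩]
            exact hset
        · have hset : pvHget (pvHset H cA cB 0) i j = pvHget H i j :=
            pvHget_set_ne H cA cB i j 0 hij
          rw [hset]
          have hiff : ((i, j) ∈ (cA, cB) :: L ∧ (isW.getD i []).getD j 0 = 1) ↔
              ((i, j) ∈ L ∧ (isW.getD i []).getD j 0 = 1) := by
            rw [List.mem_cons]
            constructor
            · rintro ⟨hh | hh, hcond⟩
              · exact absurd hh hij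
              · exact ⟨hh, hcond⟩
            · rintro ⟨hh, hcond⟩
              exact ⟨Or.inr hh, hcond⟩
          rw [if_congr hiff rfl rfl]
    · simp only [hw, if_false]
      obtain ⟨g1, g2, g3⟩ := ih H q hsh hLtail
      refine ⟨g1, ?_, ?_⟩
      · rw [g2]
        have hb : pvWb isW (cA, cB) = false := by
          unfold pvWb; rw [decide_eq_false_iff_not]; exact hw
        simp [List.filter_cons, hb]
      · intro i j hi hj
        rw [g3 i j hi hj]
        by_cases hij : (i, j) = (cA, cB)
        · rw [Prod.mk.injEq] at hij
          obtain ⟨rfl, rfl⟩ := hij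
          have hwij : ¬ (isW.getD i []).getD j 0 = 1 := hw
          rw [if_neg (fun hh => hwij hh.2), if_neg (fun hh => hwij hh.2)]
        · have hiff : ((i, j) ∈ (cA, cB) :: L ∧ (isW.getD i []).getD j 0 = 1) ↔
              ((i, j) ∈ L ∧ (isW.getD i []).getD j 0 = 1) := by
            rw [List.mem_cons]
            constructor
            · rintro ⟨hh | hh, hcond⟩
              · exact absurd hh hij
              · exact ⟨hh, hcond⟩
            · rintro ⟨hh, hcond⟩
              exact ⟨Or.inr hh, hcond⟩
          rw [if_congr hiff rfl rfl]

theorem pvInitWater_spec (isW : List (List Int)) (m n : Nat) :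
    pvShape m n (pvInitWater isW m n).1 ∧
    (pvInitWater isW m n).2 = (pvGridL m n).filter (pvWb isW) ∧
    (∀ i j, i < m → j < n →
      pvHget (pvInitWater isW m n).1 i j = if (isW.getD i []).getD j 0 = 1 then 0 else -1) := by
  have hsh0 : pvShape m n (List.replicate m (List.replicate n (-1 : Int))) := by
    constructor
    · simp
    · intro r hr
      rw [List.eq_of_mem_replicate hr]
      simp
  have hrw : pvInitWater isW m n =
      (pvGridL m n).foldl (fun st (c : Nat × Nat) =>
        if (isW.getD c.1 []).getD c.2 0 = 1 then (pvHset st.1 c.1 c.2 0, st.2 ++ [c])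
        else st) (List.replicate m (List.replicate n (-1)), []) := by
    unfold pvInitWater pvGridL
    rw [show (List.range m ×ˢ List.range n) =
      (List.range m).flatMap (fun i => (List.range n).map (fun j => (i, j))) from rfl]
    rw [List.foldl_flatMap]
    simp only [List.foldl_map]
  obtain ⟨g1, g2, g3⟩ := pvInit_foldPairs isW m n (pvGridL m n)
    (List.replicate m (List.replicate n (-1))) [] hsh0
    (fun c hc => by
      obtain ⟨cA, cB⟩ := c
      exact (pvGridL_mem m n cA cB).mp hc)
  rw [hrw]
  refine ⟨g1, by simpa using g2, ?_⟩
  intro i j hi hj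
  rw [g3 i j hi hj]
  have hmem : (i, j) ∈ pvGridL m n := (pvGridL_mem m n i j).mpr ⟨hi, hj⟩
  by_cases hw : (isW.getD i []).getD j 0 = 1 <;>
    simp [hmem, hw, pvHget_replicate m n i j hi hj]

theorem pvWaters_eq (isW : List (List Int)) (m n : Nat) :
    pvWaters isW m n = (pvGridL m n).filter (pvWb isW) := by
  unfold pvWaters pvGridL
  rw [show (List.range m ×ˢ List.range n) =
    (List.range m).flatMap (fun i => (List.range n).map (fun j => (i, j))) from rfl]
  rw [List.filter_flatMap]
  congr 1
  funext i
  rw [List.filter_map]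
  rw [pvFilterMap_filter (fun j => (isW.getD i []).getD j 0 = 1) (fun j => (i, j))
    (List.range n)]
  congr 1

theorem pvWt_mem (isW : List (List Int)) (m n : Nat) (c : Nat × Nat) :
    c ∈ pvWt isW m n ↔ c.1 < m ∧ c.2 < n ∧ (isW.getD c.1 []).getD c.2 0 = 1 := by
  unfold pvWt
  rw [Finset.mem_filter, Finset.mem_product, Finset.mem_range, Finset.mem_range]
  tauto

theorem pvQ1_mem (isW : List (List Int)) (m n : Nat) (c : Nat × Nat) :
    c ∈ (pvGridL m n).filter (pvWb isW) ↔ c ∈ pvWt isW m n := by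
  rw [List.mem_filter, pvWt_mem]
  obtain ⟨cA, cB⟩ := c
  rw [pvGridL_mem]
  simp [pvWb]
  tauto

theorem pvQ1_count (isW : List (List Int)) (m n : Nat) :
    pvUA m n (pvInitWater isW m n).1 +
      ((pvGridL m n).filter (pvWb isW)).length = m * n := by
  obtain ⟨hsh, _, hval⟩ := pvInitWater_spec isW m n
  have hlen : ((pvGridL m n).filter (pvWb isW)).length =
      (((Finset.range m) ×ˢ (Finset.range n)).filter (fun c => pvWb isW c)).card := by
    rw [← List.toFinset_card_of_nodup ((pvGridL_nodup m n).filter _)]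
    congr 1
    ext c
    rw [List.mem_toFinset, List.mem_filter, Finset.mem_filter, Finset.mem_product,
      Finset.mem_range, Finset.mem_range]
    obtain ⟨cA, cB⟩ := c
    rw [pvGridL_mem]
  have hua : pvUA m n (pvInitWater isW m n).1 =
      (((Finset.range m) ×ˢ (Finset.range n)).filter (fun c => ¬ (pvWb isW c = true))).card := by
    unfold pvUA
    congr 1
    apply Finset.filter_congr
    intro c hc
    rw [Finset.mem_product, Finset.mem_range, Finset.mem_range] at hc
    rw [hval c.1 c.2 hc.1 hc.2]
    by_cases hw : (isW.getD c.1 []).getD c.2 0 = 1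
    · have hb : pvWb isW c = true := by
        simp only [pvWb, decide_eq_true_eq]
        exact hw
      rw [if_pos hw]
      simp [hb]
    · have hb : ¬ (pvWb isW c = true) := by
        simp only [pvWb, decide_eq_true_eq]
        exact hw
      rw [if_neg hw]
      simp [hb]
  rw [hua, hlen]
  have hh := Finset.card_filter_add_card_filter_not
    (s := (Finset.range m) ×ˢ (Finset.range n)) (fun c => pvWb isW c = true)
  have hcard : ((Finset.range m) ×ˢ (Finset.range n)).card = m * n := by
    simp [Finset.card_product]
  omega

-- ---- B's closed-form entries ------------------------------------------------
theorem pvAbs_dist (i a : Nat) : |(i : Int) - (a : Int)| = (Nat.dist i a : Int) := by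
  rw [Int.abs_eq_natAbs]
  have : ((i : Int) - (a : Int)).natAbs = Nat.dist i a := by
    simp only [Nat.dist]
    omega
  exact_mod_cast this

theorem pvMin_eq (Wt : Finset (Nat × Nat)) (ws : List (Nat × Nat))
    (hmem : ∀ c, c ∈ ws ↔ c ∈ Wt) (hnil : ws ≠ []) (i j : Nat) :
    ((PySem.List.min? (ws.map (fun p => |(i : Int) - (p.1 : Int)| + |(j : Int) - (p.2 : Int)|))
      (fun v => v)).getD 0) = (pvD Wt (i, j) : Int) := by
  have hne : Wt.Nonempty := by
    rcases ws with _ | ⟨c, ws'⟩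
    · exact absurd rfl hnil
    · exact ⟨c, (hmem c).mp (by simp)⟩
  have hcast : ∀ p : Nat × Nat,
      |(i : Int) - (p.1 : Int)| + |(j : Int) - (p.2 : Int)| = (pvDist (i, j) p : Int) := by
    intro p
    rw [pvAbs_dist i p.1, pvAbs_dist j p.2]
    simp [pvDist]
  obtain ⟨v, hv⟩ : ∃ v, PySem.List.min?
      (ws.map (fun p => |(i : Int) - (p.1 : Int)| + |(j : Int) - (p.2 : Int)|))
      (fun v => v) = some v := by
    cases h : PySem.List.min?
        (ws.map (fun p => |(i : Int) - (p.1 : Int)| + |(j : Int) - (p.2 : Int)|))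
        (fun v => v) with
    | none =>
      rw [PySem.List.min?_eq_none_iff, List.map_eq_nil_iff] at h
      exact absurd h hnil
    | some v => exact ⟨v, rfl⟩
  · rw [hv]
    simp only [Option.getD_some]
    obtain ⟨p, hp, hpv⟩ := List.mem_map.mp (PySem.List.min?_mem hv)
    have hle1 : (pvD Wt (i, j) : Int) ≤ v := by
      rw [← hpv, hcast p]
      have := pvD_le Wt (i, j) p ((hmem p).mp hp)
      exact_mod_cast this
    obtain ⟨w, hw, hwD⟩ := pvD_exists Wt (i, j) hne
    have hle2 : v ≤ (pvD Wt (i, j) : Int) := by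
      have hmin := PySem.List.min?_isMin hv
        (|(i : Int) - (w.1 : Int)| + |(j : Int) - (w.2 : Int)|)
        (List.mem_map.mpr ⟨w, (hmem w).mpr hw, rfl⟩)
      rw [hcast w, ← hwD] at hmin
      exact hmin
    omega

theorem pvHget_getElem (H : List (List Int)) (i j : Nat)
    (h1 : i < H.length) (h2 : j < H[i].length) : pvHget H i j = H[i][j] := by
  unfold pvHget
  rw [List.getD_eq_getElem H [] h1, List.getD_eq_getElem H[i] 0 h2]

theorem highestPeak_main : ∀ (isWater : List (List Int)),
    highestPeak isWater = highestPeak_alt isWater := by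
  intro isW
  rcases isW with _ | ⟨r0, rs⟩
  · rfl
  set W : List (List Int) := r0 :: rs with hW
  set m : Nat := W.length with hm
  set n : Nat := r0.length with hn
  have hA : highestPeak W = pvBFS m n (m * n + 1) (pvInitWater W m n) := rfl
  have hB : highestPeak_alt W =
      (if (pvWaters W m n).isEmpty then (List.range m).map (fun _ => List.replicate n (-1))
       else (List.range m).map (fun (i : Nat) => (List.range n).map (fun (j : Nat) =>
         ((PySem.List.min? ((pvWaters W m n).map
             (fun p => |(i : Int) - (p.1 : Int)| + |(j : Int) - (p.2 : Int)|))
           (fun v => v)).getD 0)))) := rfl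
  obtain ⟨hshI, hq1I, hvalI⟩ := pvInitWater_spec W m n
  set q1 : List (Nat × Nat) := (pvGridL m n).filter (pvWb W) with hq1
  set Wt : Finset (Nat × Nat) := pvWt W m n with hWt
  have hsub : ∀ w ∈ Wt, pvIn m n w := by
    intro w hw
    have := (pvWt_mem W m n w).mp hw
    exact ⟨this.1, this.2.1⟩
  have hIW : pvInitWater W m n = ((pvInitWater W m n).1, q1) := by
    rw [show pvInitWater W m n = ((pvInitWater W m n).1, (pvInitWater W m n).2) from rfl]
    rw [hq1I]
  have hwseq : pvWaters W m n = q1 := pvWaters_eq W m n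
  by_cases hq : q1 = []
  · -- no water at all: the BFS never runs and everything stays -1
    have hnoW : ∀ i j, i < m → j < n → ¬ (W.getD i []).getD j 0 = 1 := by
      intro i j hi hj hw
      have : (i, j) ∈ q1 := by
        rw [hq1]
        rw [pvQ1_mem, pvWt_mem]
        exact ⟨hi, hj, hw⟩
      rw [hq] at this
      simp at this
    have hAe : highestPeak W = (pvInitWater W m n).1 := by
      rw [hA, hIW, hq]
      rfl
    have hBe : highestPeak_alt W = (List.range m).map (fun _ => List.replicate n (-1)) := by
      rw [hB, hwseq, hq]
      rfl
    rw [hAe, hBe]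
    apply List.ext_getElem
    · simp [hshI.1]
    · intro i h1 h2
      apply List.ext_getElem
      · have := hshI.2 ((pvInitWater W m n).1[i]) (List.getElem_mem h1)
        simp [this]
      · intro j g1 g2
        have hi : i < m := by have := hshI.1; omega
        have hj : j < n := by
          have := hshI.2 ((pvInitWater W m n).1[i]) (List.getElem_mem h1)
          omega
        have := hvalI i j hi hj
        rw [← pvHget_getElem (pvInitWater W m n).1 i j h1 g1] 
        rw [this, if_neg (hnoW i j hi hj)]
        simp
  · -- at least one water cell: the BFS fills in the distance transform
    have hWtne : Wt.Nonempty := by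
      rcases q1 with _ | ⟨c, q'⟩
      · exact absurd rfl hq
      · refine ⟨c, ?_⟩
        have hcmem : c ∈ List.filter (pvWb W) (pvGridL m n) := by
          rw [← hq1]; simp
        exact (pvQ1_mem W m n c).mp hcmem
    have inv0 : pvInv m n Wt (pvInitWater W m n).1 q1 := by
      have hmemw : ∀ c ∈ q1, c ∈ Wt := by
        intro c hc
        rw [hWt, ← pvQ1_mem, ← hq1]
        exact hc
      have hDw : ∀ c ∈ q1, pvD Wt c = 0 := fun c hc => pvD_zero_of_mem Wt c (hmemw c hc)
      refine ⟨hshI, ?_, ?_, ?_, ?_, ?_, ?_, ?_, ?_⟩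
      · -- correct
        intro i j hi hj hasn
        rw [hvalI i j hi hj] at hasn ⊢
        by_cases hw : (W.getD i []).getD j 0 = 1
        · have hmem : (i, j) ∈ Wt := (pvWt_mem W m n (i, j)).mpr ⟨hi, hj, hw⟩
          rw [pvD_zero_of_mem Wt (i, j) hmem, if_pos hw]
          simp
        · rw [if_neg hw] at hasn
          exact absurd rfl hasn
      · -- water_asn
        intro c hc
        obtain ⟨hc1, hc2, hcw⟩ := (pvWt_mem W m n c).mp hc
        rw [hvalI c.1 c.2 hc1 hc2, if_pos hcw]
        simp
      · -- inq
        intro c hc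
        obtain ⟨hc1, hc2, hcw⟩ := (pvWt_mem W m n c).mp (hmemw c hc)
        refine ⟨hc1, hc2, ?_⟩
        rw [hvalI c.1 c.2 hc1 hc2, if_pos hcw]
        simp
      · -- nodup
        rw [hq1]
        exact (pvGridL_nodup m n).filter _
      · -- sorted
        apply List.pairwise_of_forall_mem_list
        intro a ha b hb
        rw [hDw a ha, hDw b hb]
      · -- spread
        intro a ha b hb
        rw [hDw a ha, hDw b hb]
        omega
      · -- procd
        intro i j hi hj hasn hnotin y hadj hy1 hy2
        exfalso
        rw [hvalI i j hi hj] at hasn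
        by_cases hw : (W.getD i []).getD j 0 = 1
        · refine hnotin ?_
          rw [hq1, pvQ1_mem, pvWt_mem]
          exact ⟨hi, hj, hw⟩
        · rw [if_neg hw] at hasn
          exact hasn rfl
      · -- lower
        intro i j hi hj hun e he
        rw [hDw e he]
        omega
    have hbound : pvUA m n (pvInitWater W m n).1 + q1.length ≤ m * n + 1 := by
      have := pvQ1_count W m n
      rw [← hq1] at this
      omega
    obtain ⟨hshR, hvalR⟩ :=
      pvBFS_run m n Wt hWtne hsub (m * n + 1) (pvInitWater W m n).1 q1 inv0 hbound
    have hAe : highestPeak W =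
        pvBFS m n (m * n + 1) ((pvInitWater W m n).1, q1) := by rw [hA, hIW]
    have hBe : highestPeak_alt W = (List.range m).map (fun (i : Nat) => (List.range n).map (fun (j : Nat) =>
        ((PySem.List.min? (q1.map
            (fun p => |(i : Int) - (p.1 : Int)| + |(j : Int) - (p.2 : Int)|))
          (fun v => v)).getD 0))) := by
      rw [hB, hwseq]
      have : q1.isEmpty = false := by
        rcases q1 with _ | ⟨c, q'⟩
        · exact absurd rfl hq
        · rfl
      rw [this]
      rfl
    rw [hAe, hBe]
    apply List.ext_getElem
    · simp [hshR.1]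
    · intro i h1 h2
      have hi : i < m := by have := hshR.1; omega
      apply List.ext_getElem
      · have := hshR.2 ((pvBFS m n (m * n + 1) ((pvInitWater W m n).1, q1))[i]) (List.getElem_mem h1)
        simp [this, hi]
      · intro j g1 g2
        have hj : j < n := by
          have := hshR.2 ((pvBFS m n (m * n + 1) ((pvInitWater W m n).1, q1))[i]) (List.getElem_mem h1)
          omega
        rw [← pvHget_getElem _ i j h1 g1, hvalR i j hi hj]
        have hmemiff : ∀ c, c ∈ q1 ↔ c ∈ Wt := by
          intro c
          rw [hq1, hWt]
          exact pvQ1_mem W m n c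
        have := pvMin_eq Wt q1 hmemiff hq i j
        simp only [List.getElem_map, List.getElem_range]
        rw [this]

-- ===== VERDICT (by name: the statement is the Claim_ definition above) =====
theorem highestPeak_spec : Claim_equal_highestPeak := by
  intro isW _ _
  exact highestPeak_main isW
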